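-- pv_equiv track=rewrite | github.com/ParkInoh/Python-Elegance-Measure | server/public/MId103_5_raw.py | find_len_seq
-- ===== SOURCE A (Python) =====
-- def find_len_seq(integer):
--     num_seq = 1
--     set_int = []
--
--     if integer == 1:
--         return num_seq
--
--     while True:
--         new_integer = 0
--         int_list = list(str(integer))
--
--         for i in range(0, len(int_list)):
--             new_integer += int(int_list[i]) ** 2
--         num_seq += 1
--         integer = new_integer
--
--         for i in range(0, len(set_int)):
--             if set_int[i] == integer:
--                 return -1
--         set_int.append(integer)
--
--         if integer == 1:
--             return num_seq
-- ===== SOURCE B (Python) =====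
-- def find_len_seq(integer):
--     # No visited list and no string conversion: iterate the digit-square-sum
--     # map (digits extracted arithmetically with divmod) under a fixed
--     # iteration bound; any input that has not reached 1 by then is cycling.
--     count = 1
--     n = integer
--     for _ in range(1000):
--         if n == 1:
--             return count
--         s = 0
--         while n > 0:
--             n, d = divmod(n, 10)
--             s += d * d
--         n = s
--         count += 1
--     return -1
-- ===== Notes on version B (the rewrite author's own statement) =====
-- stated objective: alternative
-- what changed: B drops A's visited list with its O(k) repeat scan per step and A's str()-based digit extraction, instead extracting digits arithmetically with divmod and iterating the digit-square-sum map under a fixed iteration bound, returning -1 when 1 is not reached; cycling inputs get -1 either way.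
-- outside the precondition, e.g. on find_len_seq(-1): A raises ValueError, B returns -1
import Mathlib
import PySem

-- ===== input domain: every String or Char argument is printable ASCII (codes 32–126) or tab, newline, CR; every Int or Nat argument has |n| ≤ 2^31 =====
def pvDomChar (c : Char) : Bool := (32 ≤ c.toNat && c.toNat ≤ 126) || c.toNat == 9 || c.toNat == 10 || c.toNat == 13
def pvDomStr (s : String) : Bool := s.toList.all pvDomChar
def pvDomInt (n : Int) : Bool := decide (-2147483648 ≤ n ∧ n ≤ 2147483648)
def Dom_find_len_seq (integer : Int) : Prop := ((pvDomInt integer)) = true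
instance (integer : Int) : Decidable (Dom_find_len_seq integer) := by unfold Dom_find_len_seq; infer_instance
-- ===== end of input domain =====

-- B drops A's visited list (and its per-step repeat scan) and A's str()-based digit
-- extraction: it extracts digits arithmetically with divmod and iterates the
-- digit-square-sum map under a fixed iteration bound, returning -1 when 1 is not
-- reached (objective: alternative). A's port carries a fuel guard (999) that is
-- unreachable on the domain (A's loop always returns within a few dozen iterations
-- there); B's cap 1000 is the bound Source B really has.

-- ===== PORT A =====
-- digit-square-sum as A computes it: indexed loop over list(str(integer));
-- int(c) ported via PySem.Int.ofStr? (getD 0 only fires where Python raises, outside Pre_)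
def stepA (integer : Int) : Int :=
  let int_list := (PySem.Int.toStr integer).toList
  (PySem.List.pyRange 0 (int_list.length : Int) 1).foldl
    (fun acc i =>
      acc + ((PySem.Int.ofStr? (String.ofList [PySem.List.pyGetD int_list i ' '])).getD 0) ^ 2) 0

def loopA : Nat → Int → Int → List Int → Int
  | 0, _, _, _ => -1      -- fuel guard, unreachable on the domain
  | fuel + 1, integer, num_seq, set_int =>
    let new_integer := stepA integer
    let num_seq := num_seq + 1
    if set_int.contains new_integer then -1
    else
      let set_int := set_int ++ [new_integer]
      if new_integer == 1 then num_seq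
      else loopA fuel new_integer num_seq set_int

def find_len_seq (integer : Int) : Int :=
  if integer == 1 then 1 else loopA 999 integer 1 []

-- ===== PORT B =====
-- the divmod digit loop of Source B ('s = 0; while n > 0: n, d = divmod(n, 10); s += d*d'):
-- for n ≤ 0 the loop never runs and the sum is 0 — Int.toNat is 0 exactly there — and
-- for n > 0 Python's divmod(n, 10) is Nat's / and % (exact); the fuel argument (started
-- at the number itself, which bounds the digit count) only makes the recursion
-- structural and is never exhausted.
def sumsqGo : Nat → Nat → Int
  | _, 0 => 0
  | 0, _ + 1 => 0       -- fuel guard, unreachable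
  | f + 1, m + 1 => sumsqGo f ((m + 1) / 10) + (((m + 1) % 10 : Nat) : Int) ^ 2

def sumsq (m : Nat) : Int := sumsqGo m m

-- the 'for _ in range(1000)' loop of Source B: check n == 1 at the top, otherwise step
def loopB : Nat → Int → Int → Int
  | 0, _, _ => -1          -- cap exhausted: cycling
  | fuel + 1, n, count =>
    if n == 1 then count else loopB fuel (sumsq n.toNat) (count + 1)

def find_len_seq_alt (integer : Int) : Int := loopB 1000 integer 1

-- ===== PRECONDITION & SPEC =====
-- Pre_ excludes negative inputs: on them Python A raises ValueError (int('-')).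
def Pre_find_len_seq (integer : Int) : Prop := 0 ≤ integer
instance (integer : Int) : Decidable (Pre_find_len_seq integer) := by
  unfold Pre_find_len_seq; infer_instance
def pvWitness_find_len_seq : Int := 7

def Spec_find_len_seq (integer : Int) (out : Int) : Prop := out = find_len_seq_alt integer
instance (integer : Int) (out : Int) : Decidable (Spec_find_len_seq integer out) := by
  unfold Spec_find_len_seq; infer_instance

-- ===== CLAIM (what is proved, stated in full; the proofs are below) =====
def Claim_equal_find_len_seq : Prop := ∀ (integer : Int), Dom_find_len_seq integer → Pre_find_len_seq integer → Spec_find_len_seq integer (find_len_seq integer)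

-- ===== LEMMAS AND PROOFS =====

theorem sumsqGo_zero (f : Nat) : sumsqGo f 0 = 0 := by cases f <;> rfl

-- the fuel argument of sumsqGo is irrelevant once it is at least the value
theorem sumsqGo_fuel (m : Nat) : ∀ (f : Nat), m ≤ f → sumsqGo f m = sumsq m := by
  induction m using Nat.strong_induction_on with
  | _ m ih =>
    intro f hf
    match m, f with
    | 0, f => rw [sumsqGo_zero, sumsq, sumsqGo_zero]
    | k + 1, g + 1 =>
      show sumsqGo g ((k + 1) / 10) + _ = sumsq (k + 1)
      have hd : (k + 1) / 10 < k + 1 := Nat.div_lt_self (by omega) (by norm_num)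
      rw [ih ((k + 1) / 10) hd g (by omega)]
      conv_rhs => rw [show sumsq (k + 1)
        = sumsqGo k ((k + 1) / 10) + (((k + 1) % 10 : Nat) : Int) ^ 2 from rfl]
      rw [ih ((k + 1) / 10) hd k (by omega)]

theorem sumsq_step {m : Nat} (h : m ≠ 0) :
    sumsq m = sumsq (m / 10) + ((m % 10 : Nat) : Int) ^ 2 := by
  match m with
  | k + 1 =>
    rw [sumsq]
    show sumsqGo k ((k + 1) / 10) + _ = _
    rw [sumsqGo_fuel ((k + 1) / 10) k (by omega : (k + 1) / 10 ≤ k)]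

theorem sumsq_lt {m : Nat} (h : m < 10) : sumsq m = ((m : Nat) : Int) ^ 2 := by
  by_cases h0 : m = 0
  · subst h0; decide
  · rw [sumsq_step h0, Nat.div_eq_of_lt h, Nat.mod_eq_of_lt h, sumsq, sumsqGo_zero]
    ring

-- the decimal digit characters of m, most significant first
def pvDigits (m : Nat) : List Char :=
  if m < 10 then [Nat.digitChar m] else pvDigits (m / 10) ++ [Nat.digitChar (m % 10)]
decreasing_by exact Nat.div_lt_self (by omega) (by norm_num)

theorem pvDigits_lt {m : Nat} (h : m < 10) : pvDigits m = [Nat.digitChar m] := by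
  rw [pvDigits, if_pos h]

theorem pvDigits_ge {m : Nat} (h : ¬ m < 10) :
    pvDigits m = pvDigits (m / 10) ++ [Nat.digitChar (m % 10)] := by
  rw [pvDigits, if_neg h]

theorem toDigitsCore_eq_pvDigits (m : Nat) :
    ∀ (f : Nat) (l : List Char), m < f → Nat.toDigitsCore 10 f m l = pvDigits m ++ l := by
  induction m using Nat.strong_induction_on with
  | _ m ih =>
    intro f l hf
    match f with
    | fuel + 1 =>
      rw [Nat.toDigitsCore]
      by_cases h : m / 10 = 0
      · have hm : m < 10 := by omega
        rw [if_pos h, pvDigits_lt hm, Nat.mod_eq_of_lt hm]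
        simp
      · have hm : ¬ m < 10 := by omega
        rw [if_neg h, ih (m / 10) (by omega) fuel (Nat.digitChar (m % 10) :: l) (by omega),
          pvDigits_ge hm]
        simp

-- value of a single decimal digit character under Python's int()
theorem digitChar_val (d : Nat) (hd : d < 10) :
    ((PySem.Int.ofStr? (String.ofList [Nat.digitChar d])).getD 0) = (d : Int) := by
  interval_cases d <;> decide

theorem foldl_pvDigits (m : Nat) : ∀ (acc : Int),
    (pvDigits m).foldl
      (fun acc ch => acc + ((PySem.Int.ofStr? (String.ofList [ch])).getD 0) ^ 2) acc
      = acc + sumsq m := by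
  induction m using Nat.strong_induction_on with
  | _ m ih =>
    intro acc
    by_cases hm : m < 10
    · rw [pvDigits_lt hm, sumsq_lt hm]
      simp only [List.foldl_cons, List.foldl_nil]
      rw [digitChar_val m hm]
    · rw [pvDigits_ge hm, List.foldl_append, ih (m / 10) (by omega) acc,
        sumsq_step (by omega : m ≠ 0)]
      simp only [List.foldl_cons, List.foldl_nil]
      rw [digitChar_val (m % 10) (by omega)]
      ring

theorem stepA_eq_sumsq (n : Int) (hn : 0 ≤ n) : stepA n = sumsq n.toNat := by
  have h1 : stepA n =
      ((PySem.Int.toStr n).toList).foldl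
        (fun acc ch => acc + ((PySem.Int.ofStr? (String.ofList [ch])).getD 0) ^ 2) 0 :=
    PySem.List.foldl_pyRange_zero_pyGetD ((PySem.Int.toStr n).toList) ' '
      (fun acc ch => acc + ((PySem.Int.ofStr? (String.ofList [ch])).getD 0) ^ 2) 0
  rw [h1, PySem.Int.toList_toStr]
  show (PySem.Int.toChars n).foldl _ _ = _
  unfold PySem.Int.toChars
  rw [if_neg (by omega), Nat.toDigits,
    toDigitsCore_eq_pvDigits n.toNat (n.toNat + 1) [] (by omega), List.append_nil,
    foldl_pvDigits n.toNat 0]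
  simp

theorem sumsq_nonneg (m : Nat) : 0 ≤ sumsq m := by
  induction m using Nat.strong_induction_on with
  | _ m ih =>
    by_cases h : m = 0
    · subst h; decide
    · rw [sumsq_step h]
      have := ih (m / 10) (Nat.div_lt_self (by omega) (by norm_num))
      positivity

-- once the trajectory is inside a step-closed set avoiding 1, B's capped loop yields -1
theorem loopB_neg_one (s : List Int) (hclosed : ∀ y ∈ s, sumsq y.toNat ∈ s)
    (h1 : (1 : Int) ∉ s) :
    ∀ (fuel : Nat) (v c : Int), v ∈ s → loopB fuel v c = -1 := by
  intro fuel
  induction fuel with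
  | zero => intro v c _; rfl
  | succ f ih =>
    intro v c hv
    have hne : v ≠ 1 := fun h => h1 (h ▸ hv)
    show (if v == 1 then c else loopB f (sumsq v.toNat) (c + 1)) = -1
    rw [if_neg (by simpa using hne)]
    exact ih _ _ (hclosed v hv)

-- invariant carried by A's loop: every visited value steps into the list or is the
-- current value, 1 was never visited, and the current value is nonnegative
def InvA (v : Int) (s : List Int) : Prop :=
  (∀ y ∈ s, sumsq y.toNat ∈ s ∨ y = v) ∧ (1 : Int) ∉ s ∧ 0 ≤ v

theorem loopA_eq_loopB (fuel : Nat) :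
    ∀ (v c : Int) (s : List Int), v ≠ 1 → InvA v s →
      loopA fuel v c s = loopB (fuel + 1) v c := by
  induction fuel with
  | zero =>
    intro v c s hne _
    show (-1 : Int) = if v == 1 then c else loopB 0 (sumsq v.toNat) (c + 1)
    rw [if_neg (by simpa using hne)]
    rfl
  | succ f ih =>
    intro v c s hne hinv
    obtain ⟨hstep, h1, hv0⟩ := hinv
    have hs : stepA v = sumsq v.toNat := stepA_eq_sumsq v hv0
    show (if s.contains (stepA v) then -1
          else if stepA v == 1 then c + 1 else loopA f (stepA v) (c + 1) (s ++ [stepA v]))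
         = loopB (f + 1 + 1) v c
    rw [show loopB (f + 1 + 1) v c = loopB (f + 1) (sumsq v.toNat) (c + 1) by
      show loopB (f + 1 + 1) v c = _
      rw [show loopB (f + 1 + 1) v c
            = (if v == 1 then c else loopB (f + 1) (sumsq v.toNat) (c + 1)) from rfl,
        if_neg (by simpa using hne)]]
    rw [hs]
    set w := sumsq v.toNat with hw
    by_cases hmem : s.contains w
    · rw [if_pos hmem]
      have hmem' : w ∈ s := by simpa using hmem
      have hclosed : ∀ y ∈ s, sumsq y.toNat ∈ s := by
        intro y hy
        rcases hstep y hy with h | h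
        · exact h
        · rw [h, ← hw]; exact hmem'
      exact (loopB_neg_one s hclosed h1 (f + 1) _ _ hmem').symm
    · rw [if_neg hmem]
      by_cases hone : w = 1
      · rw [if_pos (by simpa using hone)]
        show _ = if w == 1 then c + 1 else _
        rw [if_pos (by simpa using hone)]
      · rw [if_neg (by simpa using hone)]
        refine ih w (c + 1) (s ++ [w]) hone ⟨?_, ?_, sumsq_nonneg _⟩
        · intro y hy
          rcases List.mem_append.mp hy with hy | hy
          · rcases hstep y hy with h | h
            · exact Or.inl (List.mem_append.mpr (Or.inl h))
            · exact Or.inl (by rw [h, ← hw]; exact List.mem_append.mpr (Or.inr (by simp)))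
          · simp_all
        · intro hc
          rcases List.mem_append.mp hc with hc | hc
          · exact h1 hc
          · exact hone (List.mem_singleton.mp hc).symm

-- ===== VERDICT (by name: the statements are the Claim_ definitions above) =====
theorem find_len_seq_spec : Claim_equal_find_len_seq := by
  intro integer _ hpre
  unfold Spec_find_len_seq find_len_seq find_len_seq_alt
  by_cases h : integer = 1
  · subst h; decide
  · rw [if_neg (by simpa using h)]
    exact loopA_eq_loopB 999 integer 1 [] h ⟨by simp, by simp, hpre⟩
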